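-- pv_equiv track=rewrite | github.com/zhao-zy15/PMC-Patients | downstream_task/code/dataset_construction/patient_note_recognition.py | match_patient_note
-- ===== SOURCE A (Python) =====
-- def match_patient_note(paras, patient_note):
--     for i in range(len(paras)):
--         para = paras[i][1]
--         # Single paragraph matching patient note.
--         if para == patient_note:
--             return (i, i + 1)
--         # Multiple paragraphs matching patient note.
--         # Note full match is required.
--         if patient_note.startswith(para):
--             temp = para
--             cur = i + 1
--             while cur < len(paras) and paras[cur][1] in patient_note:
--                 temp += '\n' + paras[cur][1]
--                 cur += 1
--                 if temp == patient_note: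
--                     return (i, cur)
--     assert True, "No matching."
-- ===== SOURCE B (Python) =====
-- def match_patient_note(paras, patient_note):
--     # Pointer-based scan: instead of rebuilding joined strings and substring
--     # scans, keep an index pos into patient_note and compare each candidate
--     # paragraph at its expected position.
--     n = len(patient_note)
--     m = len(paras)
--     for i in range(m):
--         t = paras[i][1]
--         if patient_note[:len(t)] != t:
--             continue
--         pos = len(t)
--         j = i + 1
--         while pos < n and j < m:
--             t = paras[j][1]
--             if patient_note[pos] != '\n' or patient_note[pos + 1:pos + 1 + len(t)] != t:
--                 break
--             pos += 1 + len(t)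
--             j += 1
--         if pos == n:
--             return (i, j)
--     return None
-- ===== Notes on version B (the rewrite author's own statement) =====
-- stated objective: faster
-- what changed: Instead of rebuilding the joined string and running a substring scan ('in') for every candidate start, B walks a single index pointer through patient_note and compares each paragraph at its expected offset, so each start costs O(L) character comparisons.
import Mathlib
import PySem

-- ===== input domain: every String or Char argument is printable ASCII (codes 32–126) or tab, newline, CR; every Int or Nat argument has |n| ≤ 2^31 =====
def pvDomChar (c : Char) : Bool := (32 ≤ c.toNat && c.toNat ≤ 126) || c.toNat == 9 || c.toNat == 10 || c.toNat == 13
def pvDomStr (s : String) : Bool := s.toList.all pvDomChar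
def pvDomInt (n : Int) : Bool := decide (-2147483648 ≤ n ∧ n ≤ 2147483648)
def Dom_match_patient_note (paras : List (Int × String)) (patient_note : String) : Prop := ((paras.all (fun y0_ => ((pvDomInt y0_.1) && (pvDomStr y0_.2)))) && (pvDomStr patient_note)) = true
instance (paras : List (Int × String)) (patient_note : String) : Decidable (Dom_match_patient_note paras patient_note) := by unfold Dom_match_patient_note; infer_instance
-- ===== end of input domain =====

-- B replaces A's repeated string-rebuilding and substring scans by a single index
-- pointer into patient_note compared at expected offsets (objective: faster).

-- ===== PORT A =====
-- inner 'while cur < len(paras) and paras[cur][1] in patient_note' loop of A;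
-- 'rest' is the suffix of paras starting at index 'cur' (strings as their code-point lists)
def pvALoop (s : List Char) (i : Nat) (temp : List Char) (cur : Nat) :
    List (Int × String) → Option (Int × Int)
  | [] => none
  | p :: rs =>
    if PySem.Chars.isIn p.2.toList s then
      let temp' := temp ++ '\n' :: p.2.toList
      if temp' = s then some ((i : Int), ((cur + 1 : Nat) : Int))
      else pvALoop s i temp' (cur + 1) rs
    else none

-- outer 'for i in range(len(paras))' loop of A; 'rest' is the suffix starting at i
def pvAOuter (s : List Char) (i : Nat) : List (Int × String) → Option (Int × Int)
  | [] => none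
  | p :: rs =>
    let para := p.2.toList
    if para = s then some ((i : Int), ((i + 1 : Nat) : Int))
    else if PySem.Chars.startswith s para then
      match pvALoop s i para (i + 1) rs with
      | some r => some r
      | none => pvAOuter s (i + 1) rs
    else pvAOuter s (i + 1) rs

def match_patient_note (paras : List (Int × String)) (patient_note : String) : Option (Int × Int) :=
  pvAOuter patient_note.toList 0 paras

-- ===== PORT B =====
-- B's inner 'while pos < n and j < m' pointer loop; returns the final (pos, j)
def pvBLoop (s : List Char) (n : Nat) (pos j : Nat) :
    List (Int × String) → Nat × Nat
  | [] => (pos, j)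
  | p :: rs =>
    if pos < n then
      let t := p.2.toList
      if PySem.List.pyGet? s (pos : Int) ≠ some '\n' ∨
         PySem.List.slice s (some ((pos + 1 : Nat) : Int)) (some ((pos + 1 + t.length : Nat) : Int)) ≠ t
      then (pos, j)
      else pvBLoop s n (pos + 1 + t.length) (j + 1) rs
    else (pos, j)

-- B's outer 'for i in range(m)' loop
def pvBOuter (s : List Char) (n : Nat) (i : Nat) : List (Int × String) → Option (Int × Int)
  | [] => none
  | p :: rs =>
    let t := p.2.toList
    if PySem.List.slice s none (some ((t.length : Nat) : Int)) ≠ t then pvBOuter s n (i + 1) rs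
    else
      let r := pvBLoop s n t.length (i + 1) rs
      if r.1 = n then some ((i : Int), (r.2 : Int)) else pvBOuter s n (i + 1) rs

def match_patient_note_alt (paras : List (Int × String)) (patient_note : String) : Option (Int × Int) :=
  pvBOuter patient_note.toList patient_note.toList.length 0 paras

-- ===== PRECONDITION & SPEC =====
def Spec_match_patient_note (paras : List (Int × String)) (patient_note : String) (out : Option (Int × Int)) : Prop := out = match_patient_note_alt paras patient_note
instance (paras : List (Int × String)) (patient_note : String) (out : Option (Int × Int)) : Decidable (Spec_match_patient_note paras patient_note out) := by unfold Spec_match_patient_note; infer_instance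

-- ===== CLAIM (what is proved, stated in full; the proofs are below) =====
def Claim_equal_match_patient_note : Prop := ∀ (paras : List (Int × String)) (patient_note : String), Dom_match_patient_note paras patient_note → Spec_match_patient_note paras patient_note (match_patient_note paras patient_note)

-- ===== LEMMAS AND PROOFS =====

-- once A's accumulated 'temp' is not a prefix of the note, the inner loop can never return
theorem pvALoop_not_prefix (s : List Char) (i : Nat) :
    ∀ (rest : List (Int × String)) (temp : List Char) (cur : Nat),
      ¬ temp <+: s → pvALoop s i temp cur rest = none := by
  intro rest
  induction rest with
  | nil => intro temp cur _; simp [pvALoop]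
  | cons p rs ih =>
    intro temp cur h
    simp only [pvALoop]
    split
    · have hpre : temp <+: temp ++ '\n' :: p.2.toList := List.prefix_append _ _
      have h' : ¬ temp ++ '\n' :: p.2.toList <+: s := fun hc => h (hpre.trans hc)
      have hne : ¬ (temp ++ '\n' :: p.2.toList = s) := fun he => h' (by rw [he])
      rw [if_neg hne]
      exact ih _ _ h'
    · rfl

-- with temp = s.take pos (pos < |s|), A's inner loop agrees with B's pointer loop
theorem pv_prefix_cancel (s u : List Char) (pos : Nat) :
    (s.take pos ++ u <+: s) ↔ u <+: s.drop pos := by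
  have hs : s.take pos ++ s.drop pos = s := List.take_append_drop pos s
  constructor
  · rintro ⟨w, hw⟩
    exact ⟨w, List.append_cancel_left (as := s.take pos) (by rw [← List.append_assoc, hw, hs])⟩
  · rintro ⟨w, hw⟩
    exact ⟨w, by rw [List.append_assoc, hw, hs]⟩

-- B's break condition is exactly '¬ ('\n' ++ next paragraph continues the note at pos)'
theorem pv_bcond (s t : List Char) (pos : Nat) (hpos : pos < s.length) :
    (PySem.List.pyGet? s ((pos : Nat) : Int) ≠ some '\n' ∨
     PySem.List.slice s (some ((pos + 1 : Nat) : Int)) (some ((pos + 1 + t.length : Nat) : Int)) ≠ t)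
    ↔ ¬ ('\n' :: t <+: s.drop pos) := by
  rw [PySem.List.pyGet?_natCast, PySem.List.slice_natCast,
      List.drop_eq_getElem_cons hpos, List.cons_prefix_cons,
      List.getElem?_eq_getElem hpos,
      show pos + 1 + t.length - (pos + 1) = t.length by omega,
      List.prefix_iff_eq_take]
  simp only [ne_eq, Option.some.injEq, not_and_or]
  constructor
  · rintro (h | h) <;> [left; right] <;> intro he <;> exact h he.symm
  · rintro (h | h) <;> [left; right] <;> intro he <;> exact h he.symm

theorem pvBLoop_stop (s : List Char) (n j : Nat) (l : List (Int × String)) :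
    pvBLoop s n n j l = (n, j) := by
  cases l <;> simp [pvBLoop]

-- with temp = s.take pos (pos < |s|), A's inner loop agrees with B's pointer loop
theorem pvLoop_eq (s : List Char) (i : Nat) :
    ∀ (rest : List (Int × String)) (pos j : Nat),
      pos < s.length →
      pvALoop s i (s.take pos) j rest =
        (if (pvBLoop s s.length pos j rest).1 = s.length
         then some ((i : Int), ((pvBLoop s s.length pos j rest).2 : Int))
         else none) := by
  intro rest
  induction rest with
  | nil =>
    intro pos j hpos
    simp only [pvALoop, pvBLoop]
    rw [if_neg (by exact Nat.ne_of_lt hpos)]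
  | cons p rs ih =>
    intro pos j hpos
    by_cases hc : '\n' :: p.2.toList <+: s.drop pos
    · -- B continues: the next paragraph matches at the expected position
      have hB : pvBLoop s s.length pos j (p :: rs) =
          pvBLoop s s.length (pos + 1 + p.2.toList.length) (j + 1) rs := by
        simp only [pvBLoop]
        rw [if_pos hpos, if_neg (fun h => ((pv_bcond s p.2.toList pos hpos).mp h) hc)]
      have hpre : s.take pos ++ '\n' :: p.2.toList <+: s := (pv_prefix_cancel s _ pos).mpr hc
      have hlen : (s.take pos ++ '\n' :: p.2.toList).length = pos + 1 + p.2.toList.length := by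
        simp [List.length_take, Nat.min_eq_left (Nat.le_of_lt hpos)]
        omega
      have hple : pos + 1 + p.2.toList.length ≤ s.length := by
        have := hpre.length_le; rw [hlen] at this; exact this
      have htemp' : s.take pos ++ '\n' :: p.2.toList = s.take (pos + 1 + p.2.toList.length) := by
        have h := List.prefix_iff_eq_take.mp hpre; rw [hlen] at h; exact h
      have hin : PySem.Chars.isIn p.2.toList s = true := by
        rw [PySem.Chars.isIn_iff_infix]
        obtain ⟨u, hu⟩ := hc
        refine ⟨s.take pos ++ ['\n'], u, ?_⟩
        have hs : s.take pos ++ s.drop pos = s := List.take_append_drop pos s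
        have hu' : '\n' :: (p.2.toList ++ u) = s.drop pos := by rw [← hu]; rfl
        rw [List.append_assoc, List.append_assoc, List.singleton_append, hu', hs]
      simp only [pvALoop]
      rw [if_pos hin]
      by_cases hend : pos + 1 + p.2.toList.length = s.length
      · have heq : s.take pos ++ '\n' :: p.2.toList = s := by
          rw [htemp', hend, List.take_length]
        rw [if_pos heq, hB, hend, pvBLoop_stop, if_pos rfl]
      · have hne : s.take pos ++ '\n' :: p.2.toList ≠ s := by
          intro he
          have := congrArg List.length he
          rw [hlen] at this
          exact hend this
        rw [if_neg hne, hB, htemp']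
        exact ih (pos + 1 + p.2.toList.length) (j + 1) (Nat.lt_of_le_of_ne hple hend)
    · -- B breaks here; A can only overshoot and never return
      have hB : pvBLoop s s.length pos j (p :: rs) = (pos, j) := by
        simp only [pvBLoop]
        rw [if_pos hpos, if_pos ((pv_bcond s p.2.toList pos hpos).mpr hc)]
      rw [hB, if_neg (fun h => Nat.ne_of_lt hpos h)]
      simp only [pvALoop]
      by_cases hin : PySem.Chars.isIn p.2.toList s = true
      · rw [if_pos hin]
        have hnp : ¬ (s.take pos ++ '\n' :: p.2.toList <+: s) :=
          fun h => hc ((pv_prefix_cancel s _ pos).mp h)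
        have hne : s.take pos ++ '\n' :: p.2.toList ≠ s := fun he => hnp (by rw [he])
        rw [if_neg hne]
        exact pvALoop_not_prefix s i rs _ (j + 1) hnp
      · rw [if_neg hin]

-- the two outer loops agree at every start index
theorem pvOuter_eq (s : List Char) :
    ∀ (rest : List (Int × String)) (i : Nat),
      pvAOuter s i rest = pvBOuter s s.length i rest := by
  intro rest
  induction rest with
  | nil => intro i; rfl
  | cons p rs ih =>
    intro i
    simp only [pvAOuter, pvBOuter]
    rw [PySem.List.slice_to_natCast]
    by_cases hpre : p.2.toList <+: s
    · have htake : s.take p.2.toList.length = p.2.toList :=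
        (List.prefix_iff_eq_take.mp hpre).symm
      have hBtake : ¬ (s.take p.2.toList.length ≠ p.2.toList) := fun h => h htake
      rw [if_neg hBtake]
      by_cases heq : p.2.toList = s
      · rw [if_pos heq]
        have hlen : p.2.toList.length = s.length := by rw [heq]
        rw [hlen, pvBLoop_stop, if_pos rfl]
      · rw [if_neg heq]
        have hsw : PySem.Chars.startswith s p.2.toList = true :=
          (PySem.Chars.startswith_iff s p.2.toList).mpr hpre
        rw [if_pos hsw]
        have hlt : p.2.toList.length < s.length :=
          Nat.lt_of_le_of_ne hpre.length_le
            (fun h => heq (by rw [List.prefix_iff_eq_take.mp hpre, h, List.take_length]))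
        have hA := pvLoop_eq s i rs p.2.toList.length (i + 1) hlt
        rw [htake] at hA
        rw [hA]
        by_cases hend : (pvBLoop s s.length p.2.toList.length (i + 1) rs).1 = s.length
        · rw [if_pos hend, if_pos hend]
        · rw [if_neg hend, if_neg hend]
          exact ih (i + 1)
    · have h1 : s.take p.2.toList.length ≠ p.2.toList :=
        fun h => hpre (List.prefix_iff_eq_take.mpr h.symm)
      rw [if_pos h1]
      have hne : p.2.toList ≠ s := fun h => hpre (h ▸ List.prefix_refl s)
      rw [if_neg hne]
      have hsw : ¬ PySem.Chars.startswith s p.2.toList = true := by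
        rw [PySem.Chars.startswith_iff]; exact hpre
      rw [if_neg hsw]
      exact ih (i + 1)

-- ===== VERDICT (by name: the statement is the Claim_ definition above) =====
theorem match_patient_note_spec : Claim_equal_match_patient_note := by
  intro paras patient_note _
  unfold Spec_match_patient_note match_patient_note match_patient_note_alt
  exact pvOuter_eq _ paras 0
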